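-- pv_equiv track=rewrite | github.com/RichieDevon53/airis | app/services/chain/instructionchainV2.py | _enhance_input
-- ===== SOURCE A (Python) =====
-- def _enhance_input(input: str) -> str:
--     """
--     Enhance the user input with additional context and instructions.
--
--     Args:
--         input (str): Original user input
--
--     Returns:
--         str: Enhanced input with additional context
--     """
--     context_additions = []
--
--     # Add specific guidance for common tasks
--     if any(keyword in input.lower() for keyword in ['gmail', 'email', 'outlook']):
--         context_additions.append("Remember to wait for web pages to load completely before interacting with them.")
--
--     if any(keyword in input.lower() for keyword in ['open', 'launch', 'start']):
--         context_additions.append("Use the KeyboardHotkey with 'win+r' for opening applications.")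
--
--     if any(keyword in input.lower() for keyword in ['browser', 'edge', 'chrome', 'firefox']):
--         context_additions.append("After opening a browser, wait a few seconds for it to fully load before navigating to websites.")
--
--     if any(keyword in input.lower() for keyword in ['search', 'find', 'look for']):
--         context_additions.append("Use KeyboardHotkey with 'ctrl+f' to open search functionality when available.")
--
--     if context_additions:
--         enhanced_input = f"{input}\n\nAdditional context: {' '.join(context_additions)}"
--     else:
--         enhanced_input = input
--
--     return enhanced_input
-- ===== SOURCE B (Python) =====
-- # B: naive multi-pattern positional scan: walk the lowercased input once, at each
-- # position test all keywords with startswith, collect matched hint indices in a set,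
-- # then emit the hints in rule order.
-- KEYWORDS = [
--     ("gmail", 0), ("email", 0), ("outlook", 0),
--     ("open", 1), ("launch", 1), ("start", 1),
--     ("browser", 2), ("edge", 2), ("chrome", 2), ("firefox", 2),
--     ("search", 3), ("find", 3), ("look for", 3),
-- ]
-- HINTS = [
--     "Remember to wait for web pages to load completely before interacting with them.",
--     "Use the KeyboardHotkey with 'win+r' for opening applications.",
--     "After opening a browser, wait a few seconds for it to fully load before navigating to websites.",
--     "Use KeyboardHotkey with 'ctrl+f' to open search functionality when available.",
-- ]
--
--
-- def _enhance_input(input: str) -> str: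
--     low = input.lower()
--     matched = set()
--     for i in range(len(low)):
--         for kw, idx in KEYWORDS:
--             if low.startswith(kw, i):
--                 matched.add(idx)
--     hints = [h for idx, h in enumerate(HINTS) if idx in matched]
--     if hints:
--         return f"{input}\n\nAdditional context: {' '.join(hints)}"
--     return input
-- ===== Notes on version B (the rewrite author's own statement) =====
-- stated objective: alternative
-- what changed: Replaces the four per-rule any-substring checks by a single positional scan of the lowercased input (a naive multi-pattern matcher testing every keyword with startswith at each position) that collects matched hint indices in a set, then emits the hints in rule order.
import Mathlib
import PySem

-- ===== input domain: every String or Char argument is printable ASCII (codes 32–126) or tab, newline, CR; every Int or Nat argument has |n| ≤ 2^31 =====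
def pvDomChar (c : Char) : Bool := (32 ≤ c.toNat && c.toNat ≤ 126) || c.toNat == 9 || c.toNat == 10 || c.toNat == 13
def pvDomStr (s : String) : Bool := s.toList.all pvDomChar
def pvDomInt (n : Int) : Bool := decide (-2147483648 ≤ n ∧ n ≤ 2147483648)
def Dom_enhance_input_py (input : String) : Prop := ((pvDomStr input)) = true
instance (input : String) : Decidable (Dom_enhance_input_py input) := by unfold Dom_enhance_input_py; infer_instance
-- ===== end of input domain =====

-- B replaces A's four per-rule substring checks by a single positional scan of the lowercased input (naive multi-pattern matcher) collecting matched hint indices in a set (alternative; same asymptotic cost).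


-- ===== PORT A =====
def enhance_input_py (input : String) : String :=
  let ca : List String := []
  let ca := if (["gmail", "email", "outlook"].any
      (fun k => PySem.Str.isIn k (PySem.Str.lower input))) then
    ca ++ ["Remember to wait for web pages to load completely before interacting with them."] else ca
  let ca := if (["open", "launch", "start"].any
      (fun k => PySem.Str.isIn k (PySem.Str.lower input))) then
    ca ++ ["Use the KeyboardHotkey with 'win+r' for opening applications."] else ca
  let ca := if (["browser", "edge", "chrome", "firefox"].any
      (fun k => PySem.Str.isIn k (PySem.Str.lower input))) then
    ca ++ ["After opening a browser, wait a few seconds for it to fully load before navigating to websites."] else ca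
  let ca := if (["search", "find", "look for"].any
      (fun k => PySem.Str.isIn k (PySem.Str.lower input))) then
    ca ++ ["Use KeyboardHotkey with 'ctrl+f' to open search functionality when available."] else ca
  if ca ≠ [] then input ++ "\n\nAdditional context: " ++ PySem.Str.join " " ca
  else input

-- ===== PORT B =====
def pvKeywords : List (List Char × Int) :=
  [("gmail".toList, 0), ("email".toList, 0), ("outlook".toList, 0),
   ("open".toList, 1), ("launch".toList, 1), ("start".toList, 1),
   ("browser".toList, 2), ("edge".toList, 2), ("chrome".toList, 2), ("firefox".toList, 2),
   ("search".toList, 3), ("find".toList, 3), ("look for".toList, 3)]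

def pvHints : List String :=
  ["Remember to wait for web pages to load completely before interacting with them.",
   "Use the KeyboardHotkey with 'win+r' for opening applications.",
   "After opening a browser, wait a few seconds for it to fully load before navigating to websites.",
   "Use KeyboardHotkey with 'ctrl+f' to open search functionality when available."]

-- low.startswith(kw, i) for 0 ≤ i is exactly 'kw is a prefix of low[i:]' = Chars.startswith (low.drop i) kw
def enhance_input_py_alt (input : String) : String :=
  let low := PySem.Chars.lower input.toList
  let matched : PySem.Set Int :=
    (List.range low.length).foldl
      (fun s i => pvKeywords.foldl
        (fun s kv => if PySem.Chars.startswith (low.drop i) kv.1 then PySem.Set.add s kv.2 else s) s)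
      PySem.Set.empty
  let hints := (PySem.List.enumerate pvHints).filterMap
      (fun p => if PySem.Set.contains matched p.1 then some p.2 else none)
  if hints ≠ [] then input ++ "\n\nAdditional context: " ++ PySem.Str.join " " hints
  else input

-- ===== PRECONDITION & SPEC =====
def Spec_enhance_input_py (input : String) (out : String) : Prop := out = enhance_input_py_alt input
instance (input : String) (out : String) : Decidable (Spec_enhance_input_py input out) := by unfold Spec_enhance_input_py; infer_instance

-- ===== CLAIM (what is proved, stated in full; the proofs are below) =====
def Claim_equal_enhance_input_py : Prop := ∀ (input : String), Dom_enhance_input_py input → Spec_enhance_input_py input (enhance_input_py input)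

-- ===== LEMMAS AND PROOFS =====

-- every keyword in the table is nonempty
theorem pvKeywords_ne_nil : ∀ kv ∈ pvKeywords, kv.1 ≠ [] := by decide

theorem enum_hints : PySem.List.enumerate pvHints =
    [((0 : Int), "Remember to wait for web pages to load completely before interacting with them."),
     ((1 : Int), "Use the KeyboardHotkey with 'win+r' for opening applications."),
     ((2 : Int), "After opening a browser, wait a few seconds for it to fully load before navigating to websites."),
     ((3 : Int), "Use KeyboardHotkey with 'ctrl+f' to open search functionality when available.")] := by
  rfl

-- membership in the inner fold over the keyword table
theorem mem_inner_fold (low : List Char) (i : Nat) (kvs : List (List Char × Int))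
    (s : PySem.Set Int) (v : Int) :
    v ∈ kvs.foldl
      (fun s kv => if PySem.Chars.startswith (low.drop i) kv.1 then PySem.Set.add s kv.2 else s) s
    ↔ v ∈ s ∨ ∃ kv ∈ kvs, PySem.Chars.startswith (low.drop i) kv.1 = true ∧ kv.2 = v := by
  induction kvs generalizing s with
  | nil => simp
  | cons kv kvs ih =>
    by_cases h : PySem.Chars.startswith (low.drop i) kv.1 = true
    · rw [List.foldl_cons, if_pos h, ih]
      constructor
      · rintro (hs | ⟨kw, hkw, hsw, hv⟩)
        · rcases (PySem.Set.mem_add _ _ _).mp hs with hs' | rfl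
          · exact Or.inl hs'
          · exact Or.inr ⟨kv, List.mem_cons_self .., h, rfl⟩
        · exact Or.inr ⟨kw, List.mem_cons_of_mem _ hkw, hsw, hv⟩
      · rintro (hs | ⟨kw, hkw, hsw, hv⟩)
        · exact Or.inl ((PySem.Set.mem_add _ _ _).mpr (Or.inl hs))
        · rcases List.mem_cons.mp hkw with rfl | hkw'
          · exact Or.inl ((PySem.Set.mem_add _ _ _).mpr (Or.inr hv.symm))
          · exact Or.inr ⟨kw, hkw', hsw, hv⟩
    · rw [List.foldl_cons, if_neg h, ih]
      constructor
      · rintro (hs | ⟨kw, hkw, hsw, hv⟩)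
        · exact Or.inl hs
        · exact Or.inr ⟨kw, List.mem_cons_of_mem _ hkw, hsw, hv⟩
      · rintro (hs | ⟨kw, hkw, hsw, hv⟩)
        · exact Or.inl hs
        · rcases List.mem_cons.mp hkw with rfl | hkw'
          · exact absurd hsw h
          · exact Or.inr ⟨kw, hkw', hsw, hv⟩

-- membership in the whole positional scan
theorem mem_scan_fold (low : List Char) (is : List Nat) (s : PySem.Set Int) (v : Int) :
    v ∈ is.foldl
      (fun s i => pvKeywords.foldl
        (fun s kv => if PySem.Chars.startswith (low.drop i) kv.1 then PySem.Set.add s kv.2 else s) s) s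
    ↔ v ∈ s ∨ ∃ i ∈ is, ∃ kv ∈ pvKeywords,
        PySem.Chars.startswith (low.drop i) kv.1 = true ∧ kv.2 = v := by
  induction is generalizing s with
  | nil => simp
  | cons i is ih =>
    rw [List.foldl_cons, ih, mem_inner_fold]
    constructor
    · rintro ((hs | hkv) | ⟨j, hj, hrest⟩)
      · exact Or.inl hs
      · exact Or.inr ⟨i, List.mem_cons_self .., hkv⟩
      · exact Or.inr ⟨j, List.mem_cons_of_mem _ hj, hrest⟩
    · rintro (hs | ⟨j, hj, hrest⟩)
      · exact Or.inl (Or.inl hs)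
      · rcases List.mem_cons.mp hj with rfl | hj'
        · exact Or.inl (Or.inr hrest)
        · exact Or.inr ⟨j, hj', hrest⟩

-- a positional startswith hit below the length is the same as a substring hit (for nonempty keywords)
theorem scan_hit_iff_isIn (low kw : List Char) (hkw : kw ≠ []) :
    (∃ i ∈ List.range low.length, PySem.Chars.startswith (low.drop i) kw = true)
    ↔ PySem.Chars.isIn kw low = true := by
  rw [← PySem.Chars.exists_prefix_drop_iff_isIn]
  constructor
  · rintro ⟨i, _, hi⟩
    exact ⟨i, (PySem.Chars.startswith_iff _ _).mp hi⟩
  · rintro ⟨j, hj⟩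
    by_cases hlen : j < low.length
    · exact ⟨j, List.mem_range.mpr hlen, (PySem.Chars.startswith_iff _ _).mpr hj⟩
    · exfalso
      rw [List.drop_eq_nil_of_le (le_of_not_gt hlen)] at hj
      exact hkw (List.prefix_nil.mp hj)

-- ===== VERDICT (by name: the statement is the Claim_ definition above) =====
theorem enhance_input_py_spec : Claim_equal_enhance_input_py := by
  intro input _
  show enhance_input_py input = enhance_input_py_alt input
  simp only [enhance_input_py, enhance_input_py_alt]
  set low := PySem.Chars.lower input.toList with hlow
  set matched :=
    (List.range low.length).foldl
      (fun s i => pvKeywords.foldl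
        (fun s kv => if PySem.Chars.startswith (low.drop i) kv.1 then PySem.Set.add s kv.2 else s) s)
      PySem.Set.empty with hmatched
  have key : ∀ v : Int, PySem.Set.contains matched v = true ↔
      ∃ kv ∈ pvKeywords, PySem.Chars.isIn kv.1 low = true ∧ kv.2 = v := by
    intro v
    rw [PySem.Set.contains_iff, hmatched, mem_scan_fold]
    simp only [PySem.Set.empty, List.not_mem_nil, false_or]
    constructor
    · rintro ⟨i, hi, kv, hkv, hsw, hv⟩
      exact ⟨kv, hkv,
        (scan_hit_iff_isIn low kv.1 (pvKeywords_ne_nil kv hkv)).mp ⟨i, hi, hsw⟩, hv⟩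
    · rintro ⟨kv, hkv, hin, hv⟩
      obtain ⟨i, hi, hsw⟩ := (scan_hit_iff_isIn low kv.1 (pvKeywords_ne_nil kv hkv)).mpr hin
      exact ⟨i, hi, kv, hkv, hsw, hv⟩
  have h0 : PySem.Set.contains matched 0 =
      (PySem.Chars.isIn "gmail".toList low || (PySem.Chars.isIn "email".toList low ||
       PySem.Chars.isIn "outlook".toList low)) := by
    rw [Bool.eq_iff_iff, key]
    simp [pvKeywords]
  have h1 : PySem.Set.contains matched 1 =
      (PySem.Chars.isIn "open".toList low || (PySem.Chars.isIn "launch".toList low ||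
       PySem.Chars.isIn "start".toList low)) := by
    rw [Bool.eq_iff_iff, key]
    simp [pvKeywords]
  have h2 : PySem.Set.contains matched 2 =
      (PySem.Chars.isIn "browser".toList low || (PySem.Chars.isIn "edge".toList low ||
       (PySem.Chars.isIn "chrome".toList low || PySem.Chars.isIn "firefox".toList low))) := by
    rw [Bool.eq_iff_iff, key]
    simp [pvKeywords]
  have h3 : PySem.Set.contains matched 3 =
      (PySem.Chars.isIn "search".toList low || (PySem.Chars.isIn "find".toList low ||
       PySem.Chars.isIn "look for".toList low)) := by
    rw [Bool.eq_iff_iff, key]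
    simp [pvKeywords]
  simp only [enum_hints, List.filterMap_cons, List.filterMap_nil, h0, h1, h2, h3,
    List.any_cons, List.any_nil, Bool.or_false, PySem.Str.isIn_eq, PySem.Str.toList_lower,
    ← hlow]
  cases (PySem.Chars.isIn "gmail".toList low || (PySem.Chars.isIn "email".toList low ||
       PySem.Chars.isIn "outlook".toList low)) <;>
  cases (PySem.Chars.isIn "open".toList low || (PySem.Chars.isIn "launch".toList low ||
       PySem.Chars.isIn "start".toList low)) <;>
  cases (PySem.Chars.isIn "browser".toList low || (PySem.Chars.isIn "edge".toList low ||
       (PySem.Chars.isIn "chrome".toList low || PySem.Chars.isIn "firefox".toList low))) <;>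
  cases (PySem.Chars.isIn "search".toList low || (PySem.Chars.isIn "find".toList low ||
       PySem.Chars.isIn "look for".toList low)) <;>
  simp
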